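-- pv_equiv track=rewrite | github.com/bogdanbaloi/industrial-hmi | scripts/inject-startup-translations.py | unquote_po
-- ===== SOURCE A (Python) =====
-- def unquote_po(quoted: str) -> str:
--     """Inverse of po_escape for a single "..." literal."""
--     inner = quoted[1:-1]
--     out = []
--     i = 0
--     while i < len(inner):
--         c = inner[i]
--         if c == chr(92) and i + 1 < len(inner):
--             nxt = inner[i + 1]
--             out.append({"n": "\n", '"': '"', chr(92): chr(92)}.get(nxt, nxt))
--             i += 2
--         else:
--             out.append(c)
--             i += 1
--     return "".join(out)
-- ===== SOURCE B (Python) =====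
-- def unquote_po(quoted: str) -> str:
--     """Inverse of po_escape: split on backslashes, then rejoin decoding one escaped char per separator."""
--     parts = quoted[1:-1].split(chr(92))
--     out = [parts[0]]
--     j = 1
--     while j < len(parts):
--         p = parts[j]
--         if p:
--             out.append('\n' if p[0] == 'n' else p[0])
--             out.append(p[1:])
--             j += 1
--         elif j + 1 < len(parts):
--             out.append(chr(92))
--             out.append(parts[j + 1])
--             j += 2
--         else:
--             out.append(chr(92))
--             j += 1
--     return ''.join(out)
-- ===== Notes on version B (the rewrite author's own statement) =====
-- stated objective: faster
-- what changed: B replaces A's per-character index-advancing while loop by splitting the inner text on the backslash character and rejoining the pieces, decoding one escaped character per separator (the escape map collapses to 'n'->newline, everything else->itself).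
import Mathlib
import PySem

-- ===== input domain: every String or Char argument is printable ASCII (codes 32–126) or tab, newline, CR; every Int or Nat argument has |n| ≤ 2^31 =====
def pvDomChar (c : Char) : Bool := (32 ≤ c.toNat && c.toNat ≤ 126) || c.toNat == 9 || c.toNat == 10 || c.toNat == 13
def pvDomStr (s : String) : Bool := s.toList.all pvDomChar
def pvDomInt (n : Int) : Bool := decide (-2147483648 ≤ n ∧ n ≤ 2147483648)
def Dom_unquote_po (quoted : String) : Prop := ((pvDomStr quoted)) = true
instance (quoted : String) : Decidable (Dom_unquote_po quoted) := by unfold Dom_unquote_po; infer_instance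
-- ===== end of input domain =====

-- B replaces A's per-character index-advancing while loop by split-on-backslash + rejoin,
-- decoding one escaped char per separator (measured faster in a timing run: bulk split/join
-- instead of a per-character Python loop).

-- ===== PORT A =====
-- A's while loop over index i; Python's out list of 1-char strings joined by '' is carried as a List Char.
def unquote_po_go (inner : List Char) (i : Nat) (out : List Char) : List Char :=
  if h : i < inner.length then
    if h2 : inner[i] = '\\' ∧ i + 1 < inner.length then
      unquote_po_go inner (i + 2)
        (out ++ [(PySem.Dict.ofList [('n', '\n'), ('"', '"'), ('\\', '\\')]).getD
                   (inner[i + 1]'h2.2) (inner[i + 1]'h2.2)])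
    else
      unquote_po_go inner (i + 1) (out ++ [inner[i]])
  else out
termination_by inner.length - i

def unquote_po (quoted : String) : String :=
  let inner := PySem.List.slice quoted.toList (some 1) (some (-1))
  String.ofList (unquote_po_go inner 0 [])

-- ===== PORT B =====
def unquote_po_altEsc (c : Char) : Char := if c == 'n' then '\n' else c

-- B's while loop over parts[1:], one step per iteration of Source B's j-loop (p nonempty / p empty
-- with a following part / lone trailing empty part).
def unquote_po_altGo : List (List Char) → List Char
  | [] => []
  | [] :: [] => ['\\']
  | [] :: q :: rest => '\\' :: (q ++ unquote_po_altGo rest)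
  | (c :: cs) :: rest => unquote_po_altEsc c :: (cs ++ unquote_po_altGo rest)

def unquote_po_alt (quoted : String) : String :=
  let inner := PySem.List.slice quoted.toList (some 1) (some (-1))
  match PySem.Chars.splitOn inner ['\\'] with
  | [] => ""   -- unreachable: str.split never returns an empty list
  | p0 :: rest => String.ofList (p0 ++ unquote_po_altGo rest)

-- ===== PRECONDITION & SPEC =====
def Spec_unquote_po (quoted : String) (out : String) : Prop := out = unquote_po_alt quoted
instance (quoted : String) (out : String) : Decidable (Spec_unquote_po quoted out) := by unfold Spec_unquote_po; infer_instance

-- ===== CLAIM (what is proved, stated in full; the proofs are below) =====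
def Claim_equal_unquote_po : Prop := ∀ (quoted : String), Dom_unquote_po quoted → Spec_unquote_po quoted (unquote_po quoted)

-- ===== LEMMAS AND PROOFS =====

-- The common reference recursion: unescape the inner text pair by pair.
def pvGoSpec : List Char → List Char
  | [] => []
  | c :: r =>
    if c = '\\' then
      match r with
      | [] => ['\\']
      | d :: r' => unquote_po_altEsc d :: pvGoSpec r'
    else c :: pvGoSpec r

theorem pvGoSpec_nil : pvGoSpec [] = [] := rfl

theorem pvGoSpec_single (c : Char) : pvGoSpec [c] = if c = '\\' then ['\\'] else [c] := rfl

theorem pvGoSpec_cons2 (c d : Char) (r : List Char) :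
    pvGoSpec (c :: d :: r) = if c = '\\' then unquote_po_altEsc d :: pvGoSpec r
      else c :: pvGoSpec (d :: r) := rfl

-- A's dict lookup is exactly the 'n'-or-identity escape map.
theorem pv_escD (c : Char) :
    (PySem.Dict.ofList [('n', '\n'), ('"', '"'), ('\\', '\\')]).getD c c = unquote_po_altEsc c := by
  have he : PySem.Dict.ofList [('n', '\n'), ('"', '"'), ('\\', '\\')] =
      PySem.Dict.mk [('n', '\n'), ('"', '"'), ('\\', '\\')] := by
    apply PySem.Dict.ext; rfl
  rw [he, PySem.Dict.getD_eq_get?_getD,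
      PySem.Dict.get?_mk_cons, PySem.Dict.get?_mk_cons, PySem.Dict.get?_mk_cons]
  unfold unquote_po_altEsc
  simp only [beq_iff_eq]
  split_ifs with h1 h2 h3 h4 h5 <;>
    simp_all [PySem.Dict.get?, eq_comm]

-- A's loop from index i computes pvGoSpec of the rest of the string.
theorem pv_goA_eq (inner : List Char) (i : Nat) (out : List Char) :
    unquote_po_go inner i out = out ++ pvGoSpec (inner.drop i) := by
  refine unquote_po_go.induct inner
    (fun i out => unquote_po_go inner i out = out ++ pvGoSpec (inner.drop i)) ?_ ?_ ?_ i out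
  · intro i out h h2 ih
    rw [unquote_po_go.eq_def, dif_pos h, dif_pos h2]
    rw [ih]
    have hd : inner.drop i = inner[i] :: inner[i + 1] :: inner.drop (i + 2) := by
      rw [List.drop_eq_getElem_cons h, List.drop_eq_getElem_cons h2.2]
    rw [hd]
    simp [pvGoSpec, h2.1, pv_escD]
  · intro i out h h2 ih
    rw [unquote_po_go.eq_def, dif_pos h, dif_neg h2]
    rw [ih]
    have hd : inner.drop i = inner[i] :: inner.drop (i + 1) := List.drop_eq_getElem_cons h
    rw [hd]
    by_cases hb : inner[i] = '\\'
    · have hi : ¬ i + 1 < inner.length := fun hlt => h2 ⟨hb, hlt⟩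
      have hnil : inner.drop (i + 1) = [] := List.drop_eq_nil_of_le (by omega)
      simp [hnil, hb, pvGoSpec]
    · cases hr : inner.drop (i + 1) with
      | nil =>
        simp [pvGoSpec_nil, pvGoSpec_single, hb]
      | cons d r' =>
        rw [pvGoSpec_cons2, if_neg hb]
        simp
  · intro i out h
    rw [unquote_po_go.eq_def, dif_neg h]
    have hnil : inner.drop i = [] := List.drop_eq_nil_of_le (by omega)
    simp [hnil, pvGoSpec]

-- A fuel-free description of str.split on a single backslash separator.
def pvSplit1 : List Char → List (List Char)
  | [] => [[]]
  | c :: r =>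
    if c = '\\' then [] :: pvSplit1 r
    else
      match pvSplit1 r with
      | [] => [[c]]
      | q :: t => (c :: q) :: t

theorem pvSplit1_ne_nil (l : List Char) : pvSplit1 l ≠ [] := by
  cases l with
  | nil => simp [pvSplit1]
  | cons c r =>
    rw [pvSplit1]
    split_ifs
    · simp
    · cases h : pvSplit1 r <;> simp

theorem pv_go_split (fuel : Nat) (l cur : List Char) (acc : List (List Char))
    (hf : l.length < fuel) :
    PySem.Chars.splitOn.go ['\\'] fuel l cur acc =
      acc.reverse ++
        (match pvSplit1 l with
         | [] => []
         | q :: t => (cur.reverse ++ q) :: t) := by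
  induction fuel generalizing l cur acc with
  | zero => omega
  | succ f ih =>
    cases l with
    | nil => simp [PySem.Chars.splitOn.go, pvSplit1]
    | cons c r =>
      rw [PySem.Chars.splitOn.go]
      by_cases hb : c = '\\'
      · have hpre : List.isPrefixOf ['\\'] (c :: r) = true := by
          simp [List.isPrefixOf, hb]
        rw [if_pos hpre]
        have hdrop : List.drop (['\\'] : List Char).length (c :: r) = r := by simp
        rw [hdrop, ih r [] (cur.reverse :: acc) (by simp at hf ⊢; omega)]
        rcases h1 : pvSplit1 r with _ | ⟨q, t⟩
        · exact absurd h1 (pvSplit1_ne_nil r)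
        · simp [pvSplit1, hb, h1]
      · have hpre : List.isPrefixOf ['\\'] (c :: r) = false := by
          simp [List.isPrefixOf]; exact fun h => hb h.symm
        rw [if_neg (by simp [hpre])]
        rw [ih r (c :: cur) acc (by simp at hf ⊢; omega)]
        rcases h1 : pvSplit1 r with _ | ⟨q, t⟩
        · exact absurd h1 (pvSplit1_ne_nil r)
        · simp [pvSplit1, hb, h1]

theorem pv_splitOn_eq (l : List Char) : PySem.Chars.splitOn l ['\\'] = pvSplit1 l := by
  rw [PySem.Chars.splitOn, pv_go_split (l.length + 1) l [] [] (by omega)]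
  rcases h1 : pvSplit1 l with _ | ⟨q, t⟩
  · exact absurd h1 (pvSplit1_ne_nil l)
  · simp

-- B's rejoin over the split pieces is the same reference recursion.
theorem pv_goB_eq (l : List Char) :
    ∀ q t, pvSplit1 l = q :: t → q ++ unquote_po_altGo t = pvGoSpec l := by
  induction l using pvGoSpec.induct with
  | case1 =>
    intro q t h
    simp only [pvSplit1] at h
    cases h
    rfl
  | case2 =>
    -- l = ['\\']
    intro q t h
    simp only [pvSplit1, if_pos rfl] at h
    cases h
    rfl
  | case3 d r' ih =>
    -- l = '\\' :: d :: r'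
    intro q t h
    rw [pvSplit1, if_pos rfl] at h
    rcases h2 : pvSplit1 r' with _ | ⟨q2, t2⟩
    · exact absurd h2 (pvSplit1_ne_nil r')
    · by_cases hd : d = '\\'
      · rw [pvSplit1, if_pos hd, h2] at h
        injection h with hq ht
        subst hq; subst ht; subst hd
        simp only [unquote_po_altGo, List.nil_append]
        rw [ih q2 t2 h2]
        simp [pvGoSpec, unquote_po_altEsc]
      · rw [pvSplit1, if_neg hd, h2] at h
        injection h with hq ht
        subst hq; subst ht
        simp only [unquote_po_altGo, List.nil_append]
        rw [ih q2 t2 h2]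
        simp [pvGoSpec]
  | case4 c r hb ih =>
    intro q t h
    rw [pvSplit1, if_neg hb] at h
    rcases h2 : pvSplit1 r with _ | ⟨q2, t2⟩
    · exact absurd h2 (pvSplit1_ne_nil r)
    · rw [h2] at h
      injection h with hq ht
      subst hq; subst ht
      rw [List.cons_append, ih q2 t2 h2]
      cases r with
      | nil => rw [pvGoSpec_nil, pvGoSpec_single, if_neg hb]
      | cons d r' => rw [pvGoSpec_cons2, if_neg hb]

theorem pv_main (inner : List Char) :
    String.ofList (unquote_po_go inner 0 []) =
      (match PySem.Chars.splitOn inner ['\\'] with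
       | [] => ""
       | p0 :: rest => String.ofList (p0 ++ unquote_po_altGo rest)) := by
  rw [pv_splitOn_eq]
  rcases h1 : pvSplit1 inner with _ | ⟨q, t⟩
  · exact absurd h1 (pvSplit1_ne_nil _)
  · rw [pv_goA_eq]
    have hB := pv_goB_eq inner q t h1
    simp only [List.drop_zero, List.nil_append]
    rw [← hB]

-- ===== VERDICT (by name: the statement is the Claim_ definition above) =====
theorem unquote_po_spec : Claim_equal_unquote_po := by
  intro quoted _
  exact pv_main (PySem.List.slice quoted.toList (some 1) (some (-1)))
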